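-- pv_equiv track=rewrite | github.com/Dilip9090/DSA_GFG | Difficulty: Easy/Remove minimum number of elements/remove-minimum-number-of-elements.py | minRemove
-- ===== SOURCE A (Python) =====
-- from collections import Counter
--
-- def minRemove(arr1, arr2):
--     count1 = Counter(arr1)
--     count2 = Counter(arr2)
--
--     result = 0
--
--     for x in count1:
--         if x in count2:
--             result += min(count1[x], count2[x])
--
--     return result
-- ===== SOURCE B (Python) =====
-- from collections import Counter
--
-- def minRemove(arr1, arr2):
--     # One pass over arr1: an element can be "kept" if arr2 still has unmatched
--     # capacity for it, i.e. the number of copies seen so far is below its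
--     # count in arr2.  The kept elements number sum(min(c1[x], c2[x])).
--     count2 = Counter(arr2)
--     seen = Counter()
--     result = 0
--     for x in arr1:
--         if seen[x] < count2[x]:
--             result += 1
--         seen[x] += 1
--     return result
-- ===== Notes on version B (the rewrite author's own statement) =====
-- stated objective: alternative
-- what changed: Instead of building both Counters and looping over the distinct keys of the first taking min of the two counts, B makes a single pass over arr1 itself, counting each element that still has unmatched capacity in Counter(arr2) (seen-so-far count below arr2's count).
import Mathlib
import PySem

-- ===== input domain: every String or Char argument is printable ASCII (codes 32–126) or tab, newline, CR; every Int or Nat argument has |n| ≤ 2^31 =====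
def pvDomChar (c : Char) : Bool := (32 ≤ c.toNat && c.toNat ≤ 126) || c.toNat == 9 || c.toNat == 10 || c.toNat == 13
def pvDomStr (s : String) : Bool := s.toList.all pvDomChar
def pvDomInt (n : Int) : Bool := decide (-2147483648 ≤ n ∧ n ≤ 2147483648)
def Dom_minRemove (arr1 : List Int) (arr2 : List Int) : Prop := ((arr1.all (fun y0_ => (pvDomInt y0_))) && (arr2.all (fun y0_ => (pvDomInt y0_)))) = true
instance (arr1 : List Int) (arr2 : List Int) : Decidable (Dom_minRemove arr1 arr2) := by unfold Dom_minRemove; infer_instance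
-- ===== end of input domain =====

-- B replaces A's per-distinct-key loop over Counter(arr1) by a single pass over arr1
-- counting elements still covered by arr2's remaining capacity (alternative decomposition, same cost).

-- ===== PORT A =====
def minRemove (arr1 : List Int) (arr2 : List Int) : Int :=
  let count1 := PySem.Dict.counter arr1
  let count2 := PySem.Dict.counter arr2
  count1.keys.foldl
    (fun result x =>
      if count2.contains x then result + min (count1.getD x 0) (count2.getD x 0)
      else result) 0

-- ===== PORT B =====
def minRemove_alt (arr1 : List Int) (arr2 : List Int) : Int :=
  let count2 := PySem.Dict.counter arr2
  (arr1.foldl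
    (fun (s : PySem.Dict Int Int × Int) x =>
      let result := if s.1.getD x 0 < count2.getD x 0 then s.2 + 1 else s.2
      (s.1.modify x 0 (· + 1), result))
    (PySem.Dict.empty, 0)).2

-- ===== PRECONDITION & SPEC =====
def Spec_minRemove (arr1 : List Int) (arr2 : List Int) (out : Int) : Prop := out = minRemove_alt arr1 arr2
instance (arr1 : List Int) (arr2 : List Int) (out : Int) : Decidable (Spec_minRemove arr1 arr2 out) := by unfold Spec_minRemove; infer_instance

-- ===== CLAIM (what is proved, stated in full; the proofs are below) =====
def Claim_equal_minRemove : Prop := ∀ (arr1 : List Int) (arr2 : List Int), Dom_minRemove arr1 arr2 → Spec_minRemove arr1 arr2 (minRemove arr1 arr2)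

-- ===== LEMMAS AND PROOFS =====

-- updating a nodup list's summand at one present key shifts the sum by d
lemma pv_sum_update (l : List Int) (hn : l.Nodup) (f g : Int → Int) (y : Int) (hy : y ∈ l)
    (d : Int) (hne : ∀ x ∈ l, x ≠ y → g x = f x) (hyv : g y = f y + d) :
    (l.map g).sum = (l.map f).sum + d := by
  induction l with
  | nil => cases hy
  | cons a t ih =>
    simp only [List.nodup_cons] at hn
    rcases List.mem_cons.mp hy with rfl | hy
    · have : t.map g = t.map f :=
        List.map_congr_left (fun x hx => hne x (List.mem_cons_of_mem _ hx)
          (by rintro rfl; exact hn.1 hx))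
      simp only [List.map_cons, List.sum_cons, this, hyv]; ring
    · have ha : g a = f a := hne a List.mem_cons_self (by rintro rfl; exact hn.1 hy)
      rw [List.map_cons, List.map_cons, List.sum_cons, List.sum_cons, ha,
        ih hn.2 hy (fun x hx hxy => hne x (List.mem_cons_of_mem _ hx) hxy)]
      ring

-- the B loop computes the per-distinct-key min-sum
lemma pv_bfold (arr2 : List Int) (l : List Int) :
    l.foldl (fun (s : PySem.Dict Int Int × Int) x =>
        let result := if s.1.getD x 0 < (PySem.Dict.counter arr2).getD x 0 then s.2 + 1 else s.2
        (s.1.modify x 0 (· + 1), result)) (PySem.Dict.empty, 0)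
    = (PySem.Dict.counter l,
       ((PySem.Set.ofList l).map
          (fun x => min ((l.count x : Int)) ((arr2.count x : Int)))).sum) := by
  induction l using List.reverseRecOn with
  | nil => rfl
  | append_singleton t y ih =>
    rw [List.foldl_append, ih]
    simp only [List.foldl_cons, List.foldl_nil]
    rw [PySem.Dict.getD_counter, PySem.Dict.getD_counter, ← PySem.Dict.counter_append_singleton]
    have hset : PySem.Set.ofList (t ++ [y]) = PySem.Set.add (PySem.Set.ofList t) y := by
      rw [PySem.Set.ofList_eq_foldl, PySem.Set.ofList_eq_foldl, List.foldl_append]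
      rfl
    by_cases hy : y ∈ t
    · have hadd : PySem.Set.add (PySem.Set.ofList t) y = PySem.Set.ofList t := by
        simp [PySem.Set.add, PySem.Set.contains, (PySem.Set.mem_ofList t y).mpr hy]
      rw [hset, hadd]
      refine Prod.ext rfl ?_
      have := pv_sum_update (PySem.Set.ofList t) (PySem.Set.nodup_ofList t)
        (fun x => min ((t.count x : Int)) ((arr2.count x : Int)))
        (fun x => min (((t ++ [y]).count x : Int)) ((arr2.count x : Int)))
        y ((PySem.Set.mem_ofList t y).mpr hy)
        (if (t.count y : Int) < (arr2.count y : Int) then 1 else 0)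
        (fun x _ hxy => by
          simp [List.count_append, hxy.symm])
        (by
          simp only [List.count_append, List.count_singleton', if_pos]
          push_cast
          omega)
      simp only [this]
      split <;> simp
    · have hadd : PySem.Set.add (PySem.Set.ofList t) y = PySem.Set.ofList t ++ [y] := by
        simp [PySem.Set.add]
        exact hy
      rw [hset, hadd]
      refine Prod.ext rfl ?_
      have hmap : (PySem.Set.ofList t).map
            (fun x => min (((t ++ [y]).count x : Int)) ((arr2.count x : Int)))
          = (PySem.Set.ofList t).map
            (fun x => min ((t.count x : Int)) ((arr2.count x : Int))) := by
        refine List.map_congr_left (fun x hx => ?_)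
        have hxy : x ≠ y := fun h => hy (h ▸ (PySem.Set.mem_ofList t x).mp hx)
        simp [List.count_append, hxy.symm]
      have hcnt0 : t.count y = 0 := List.count_eq_zero.mpr hy
      rw [List.map_append, hmap]
      simp only [List.map_cons, List.map_nil, List.sum_append, List.sum_cons,
        List.sum_nil, List.count_append, List.count_singleton', if_pos, hcnt0]
      have h2 : (0:Int) ≤ (arr2.count y : Int) := Int.natCast_nonneg _
      split <;> push_cast <;> omega

-- A equals the same per-distinct-key min-sum
lemma pv_aside (arr1 arr2 : List Int) :
    minRemove arr1 arr2
    = ((PySem.Set.ofList arr1).map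
        (fun x => min ((arr1.count x : Int)) ((arr2.count x : Int)))).sum := by
  show (List.foldl (fun result x =>
      if (PySem.Dict.counter arr2).contains x = true then
        result + min ((PySem.Dict.counter arr1).getD x 0) ((PySem.Dict.counter arr2).getD x 0)
      else result) 0 (PySem.Dict.counter arr1).keys) = _
  rw [PySem.Dict.keys_counter]
  rw [PySem.List.foldl_congr_mem _ _
      (fun r x => r + min ((arr1.count x : Int)) ((arr2.count x : Int))) _
      (fun acc x hx => ?_)]
  · rw [PySem.List.foldl_add]; simp
  · rw [PySem.Dict.contains_counter, PySem.Dict.getD_counter, PySem.Dict.getD_counter]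
    by_cases hmem : x ∈ arr2
    · have hc : arr2.contains x = true := by simpa [List.contains_iff_mem] using hmem
      rw [if_pos hc]
    · have hc : arr2.contains x = false := by simpa [List.contains_iff_mem] using hmem
      have h0 : arr2.count x = 0 := List.count_eq_zero.mpr hmem
      simp only [hc, Bool.false_eq_true, if_false, h0, Nat.cast_zero]
      omega

-- ===== VERDICT (by name: the statement is the Claim_ definition above) =====
theorem minRemove_spec : Claim_equal_minRemove := by
  intro arr1 arr2 _
  show minRemove arr1 arr2 = minRemove_alt arr1 arr2
  rw [pv_aside]
  show _ = (List.foldl (fun (s : PySem.Dict Int Int × Int) x =>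
      let result := if s.1.getD x 0 < (PySem.Dict.counter arr2).getD x 0 then s.2 + 1 else s.2
      (s.1.modify x 0 (· + 1), result)) (PySem.Dict.empty, 0) arr1).2
  rw [pv_bfold arr2 arr1]
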